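-- pv_equiv track=rewrite | github.com/jiturbide/python | interview/Metacareers/revenue_milestones.py | getMilestoneDays
-- ===== SOURCE A (Python) =====
-- def getMilestoneDays(revenues, milestones):
--   # Write your code here
--   days = []
--   sortedMilestones = []
--   for i in range(len(milestones)):
--     sortedMilestones.append([milestones[i], i+1, -1])
--
--   sortedMilestones.sort(key= lambda m : m[0])
--
--   currIdxMilestone = 0
--   currentSum = 0
--   for i in range(len(revenues)):
--     currentSum += revenues[i]
--     while currIdxMilestone < len(sortedMilestones) and currentSum >= sortedMilestones[currIdxMilestone][0]:
--       sortedMilestones[currIdxMilestone][2] = i + 1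
--       currIdxMilestone += 1
--
--     if currIdxMilestone == len(milestones):
--       break
--
--   sortedMilestones.sort(key= lambda m: m[1])
--
--   for i in range(len(sortedMilestones)):
--       days.append(sortedMilestones[i][2])
--
--   return days
-- ===== SOURCE B (Python) =====
-- def _first_day(prefix, m):
--   for i, p in enumerate(prefix):
--     if p >= m:
--       return i + 1
--   return -1
--
-- def getMilestoneDays(revenues, milestones):
--   prefix = []
--   s = 0
--   for r in revenues:
--     s += r
--     prefix.append(s)
--   return [_first_day(prefix, m) for m in milestones]
-- ===== Notes on version B (the rewrite author's own statement) =====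
-- stated objective: simpler
-- what changed: Replaced A's sort-milestones + two-pointer sweep + re-sort-by-index pipeline with a single prefix-sum pass and, per milestone in original order, a plain first-match linear scan of the prefix array.
import Mathlib
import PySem

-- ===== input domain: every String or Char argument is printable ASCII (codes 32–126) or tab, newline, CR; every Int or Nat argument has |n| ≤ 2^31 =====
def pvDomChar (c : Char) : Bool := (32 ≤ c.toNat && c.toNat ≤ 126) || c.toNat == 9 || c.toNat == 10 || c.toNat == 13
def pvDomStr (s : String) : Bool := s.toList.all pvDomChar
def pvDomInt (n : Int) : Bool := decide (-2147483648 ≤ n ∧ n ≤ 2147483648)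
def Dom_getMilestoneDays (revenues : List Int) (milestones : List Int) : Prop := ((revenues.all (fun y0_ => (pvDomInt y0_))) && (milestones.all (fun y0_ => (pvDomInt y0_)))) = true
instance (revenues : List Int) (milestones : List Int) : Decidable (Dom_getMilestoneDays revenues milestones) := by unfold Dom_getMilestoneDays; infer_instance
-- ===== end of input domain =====

-- B replaces A's sort + two-pointer sweep + re-sort pipeline by one prefix-sum pass and a per-milestone first-match scan (simpler).


-- ===== PORT A =====
-- for i in range(len(milestones)): sortedMilestones.append([milestones[i], i+1, -1])
-- (index i is always in range, so the pyGetD default 0 is never used)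
def pvBuildA (milestones : List Int) : List (Int × Int × Int) :=
  (List.range milestones.length).foldl
    (fun acc (i : Nat) => acc ++ [(PySem.List.pyGetD milestones (i : Int) 0, (i : Int) + 1, -1)]) []

-- while currIdxMilestone < len(sortedMilestones) and currentSum >= sortedMilestones[currIdxMilestone][0]: …
def pvWhileA (total : Int) (day : Int) (idx : Nat) (sm : List (Int × Int × Int)) :
    Nat × List (Int × Int × Int) :=
  match h : sm[idx]? with
  | none => (idx, sm)
  | some t =>
    if total ≥ t.1 then pvWhileA total day (idx + 1) (sm.set idx (t.1, t.2.1, day))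
    else (idx, sm)
  termination_by sm.length - idx
  decreasing_by
    have hlt : idx < sm.length := (List.getElem?_eq_some_iff.mp h).1
    simp only [List.length_set]; omega

-- for i in range(len(revenues)): … (with the early break when currIdxMilestone == len(milestones))
def pvMainA (mlen : Nat) (revs : List Int) (day total : Int) (idx : Nat)
    (sm : List (Int × Int × Int)) : Nat × List (Int × Int × Int) :=
  match revs with
  | [] => (idx, sm)
  | r :: rest =>
    let total' := total + r
    let p := pvWhileA total' day idx sm
    if p.1 == mlen then p
    else pvMainA mlen rest (day + 1) total' p.1 p.2

def getMilestoneDays (revenues : List Int) (milestones : List Int) : List Int :=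
  let sm0 := PySem.List.sorted (pvBuildA milestones) (fun t => t.1) false
  let res := pvMainA milestones.length revenues 1 0 0 sm0
  let sm2 := PySem.List.sorted res.2 (fun t => t.2.1) false
  sm2.foldl (fun days t => days ++ [t.2.2]) []

-- ===== PORT B =====
-- prefix = []; s = 0; for r in revenues: s += r; prefix.append(s)
def pvPrefixB (revenues : List Int) : Int × List Int :=
  revenues.foldl (fun st r => (st.1 + r, st.2 ++ [st.1 + r])) (0, [])

-- _first_day: for i, p in enumerate(prefix): if p >= m: return i+1; return -1
def pvFirstDayB (pref : List Int) (m : Int) (i : Nat) : Int :=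
  match pref with
  | [] => -1
  | p :: rest => if p ≥ m then (i : Int) + 1 else pvFirstDayB rest m (i + 1)

def getMilestoneDays_alt (revenues : List Int) (milestones : List Int) : List Int :=
  let pref := (pvPrefixB revenues).2
  milestones.map (fun m => pvFirstDayB pref m 0)

-- ===== PRECONDITION & SPEC =====
def Spec_getMilestoneDays (revenues : List Int) (milestones : List Int) (out : List Int) : Prop := out = getMilestoneDays_alt revenues milestones
instance (revenues : List Int) (milestones : List Int) (out : List Int) : Decidable (Spec_getMilestoneDays revenues milestones out) := by unfold Spec_getMilestoneDays; infer_instance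

-- ===== CLAIM (what is proved, stated in full; the proofs are below) =====
def Claim_equal_getMilestoneDays : Prop := ∀ (revenues : List Int) (milestones : List Int), Dom_getMilestoneDays revenues milestones → Spec_getMilestoneDays revenues milestones (getMilestoneDays revenues milestones)

-- ===== LEMMAS AND PROOFS =====

-- prefix sums starting from s
def pvPrefs (s : Int) : List Int → List Int
  | [] => []
  | r :: rest => (s + r) :: pvPrefs (s + r) rest

-- first day (1-based, counting from d) at which a prefix reaches m, else -1
def pvFd (m : Int) (P : List Int) (d : Int) : Int :=
  match P with
  | [] => -1
  | p :: rest => if p ≥ m then d else pvFd m rest (d + 1)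

lemma pvPrefixB_go (revs : List Int) (s : Int) (acc : List Int) :
    revs.foldl (fun st r => (st.1 + r, st.2 ++ [st.1 + r])) (s, acc)
      = (s + revs.sum, acc ++ pvPrefs s revs) := by
  induction revs generalizing s acc with
  | nil => simp [pvPrefs]
  | cons r rest ih => simp [pvPrefs, ih, List.append_assoc]; ring

lemma pvFirstDayB_eq_fd (P : List Int) (m : Int) (i : Nat) :
    pvFirstDayB P m i = pvFd m P ((i : Int) + 1) := by
  induction P generalizing i with
  | nil => simp [pvFirstDayB, pvFd]
  | cons p rest ih =>
    simp only [pvFirstDayB, pvFd]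
    split_ifs with h
    · rfl
    · rw [ih]; push_cast; ring_nf

lemma alt_eq (revs ms : List Int) :
    getMilestoneDays_alt revs ms = ms.map (fun m => pvFd m (pvPrefs 0 revs) 1) := by
  unfold getMilestoneDays_alt pvPrefixB
  rw [pvPrefixB_go]
  simp [pvFirstDayB_eq_fd]

-- ---- A side ----

lemma pvFoldlApp {α β : Type} (l : List α) (f : α → β) (acc : List β) :
    l.foldl (fun a x => a ++ [f x]) acc = acc ++ l.map f := by
  induction l generalizing acc with
  | nil => simp
  | cons a rest ih => simp [ih]

lemma pvBuildA_eq (ms : List Int) :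
    pvBuildA ms = ms.zipIdx.map (fun p => (p.1, (p.2 : Int) + 1, (-1 : Int))) := by
  unfold pvBuildA
  rw [pvFoldlApp (List.range ms.length)
      (fun i => ((PySem.List.pyGetD ms (i : Int) 0), ((i : Int) + 1), (-1 : Int))) []]
  apply List.ext_getElem
  · simp
  · intro i h1 h2
    have hi : i < ms.length := by simpa using h2
    simp only [List.nil_append, List.getElem_map, List.getElem_range, List.getElem_zipIdx,
      PySem.List.pyGetD_natCast]
    simp [List.getD_eq_getElem?_getD, List.getElem?_eq_getElem hi]

lemma set_len_append {α : Type} (pre : List α) (t v : α) (rest : List α) :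
    (pre ++ t :: rest).set pre.length v = pre ++ v :: rest := by
  induction pre with
  | nil => simp
  | cons a l ih => simp [ih]

lemma whileA_spec (total day : Int) (pre post : List (Int × Int × Int))
    (hs : post.Pairwise (fun a b => a.1 ≤ b.1)) :
    pvWhileA total day pre.length (pre ++ post)
      = (pre.length + (post.takeWhile (fun t => total ≥ t.1)).length,
         pre ++ post.map (fun t => if total ≥ t.1 then (t.1, t.2.1, day) else t)) := by
  induction post generalizing pre with
  | nil =>
    rw [pvWhileA]
    split
    · simp
    · rename_i t h
      simp at h
  | cons t rest ih =>
    have hget : (pre ++ t :: rest)[pre.length]? = some t := by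
      simp
    unfold pvWhileA
    rw [hget]
    simp only
    by_cases hc : total ≥ t.1
    · rw [if_pos hc, set_len_append]
      have hlen : pre.length + 1 = (pre ++ [(t.1, t.2.1, day)]).length := by simp
      rw [hlen]
      have : pre ++ (t.1, t.2.1, day) :: rest = (pre ++ [(t.1, t.2.1, day)]) ++ rest := by
        simp
      rw [this, ih _ hs.of_cons]
      simp [hc]
      omega
    · rw [if_neg hc]
      have hrest : ∀ u ∈ rest, ¬ total ≥ u.1 := by
        intro u hu
        have := (List.pairwise_cons.mp hs).1 u hu
        omega
      have hmap : rest.map (fun u => if total ≥ u.1 then (u.1, u.2.1, day) else u) = rest := by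
        conv_rhs => rw [← List.map_id rest]
        exact List.map_congr_left (fun u hu => by simp [hrest u hu])
      simp [hc, hmap]

lemma dropWhile_fails (total : Int) (post : List (Int × Int × Int))
    (hs : post.Pairwise (fun a b => a.1 ≤ b.1)) :
    ∀ u ∈ post.dropWhile (fun t => total ≥ t.1), ¬ total ≥ u.1 := by
  induction post with
  | nil => simp
  | cons t rest ih =>
    intro u hu
    rw [List.dropWhile_cons] at hu
    by_cases hc : total ≥ t.1
    · simp only [hc] at hu
      simp only [decide_true, if_true] at hu
      exact ih hs.of_cons u hu
    · simp only [hc] at hu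
      simp only [decide_false] at hu
      rcases List.mem_cons.mp hu with rfl | hu'
      · exact hc
      · have := (List.pairwise_cons.mp hs).1 u hu'
        omega

lemma map_split (total day : Int) (post : List (Int × Int × Int))
    (hs : post.Pairwise (fun a b => a.1 ≤ b.1)) :
    post.map (fun t => if total ≥ t.1 then (t.1, t.2.1, day) else t)
      = (post.takeWhile (fun t => total ≥ t.1)).map (fun t => (t.1, t.2.1, day))
        ++ post.dropWhile (fun t => total ≥ t.1) := by
  conv_lhs => rw [← List.takeWhile_append_dropWhile (p := fun t => decide (total ≥ t.1)) (l := post)]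
  rw [List.map_append]
  congr 1
  · exact List.map_congr_left (fun u hu => by
      have := List.mem_takeWhile_imp hu
      simp at this
      simp [this])
  · have h := dropWhile_fails total post hs
    conv_rhs => rw [← List.map_id (post.dropWhile (fun t => decide (total ≥ t.1)))]
    exact List.map_congr_left (fun u hu => by simp [h u hu])

lemma mainA_spec (mlen : Nat) (revs : List Int) (day total : Int)
    (pre post : List (Int × Int × Int))
    (hs : post.Pairwise (fun a b => a.1 ≤ b.1))
    (hneg : ∀ t ∈ post, t.2.2 = -1)
    (hlen : mlen = pre.length + post.length) :
    (pvMainA mlen revs day total pre.length (pre ++ post)).2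
      = pre ++ post.map (fun t => (t.1, t.2.1, pvFd t.1 (pvPrefs total revs) day)) := by
  induction revs generalizing day total pre post with
  | nil =>
    unfold pvMainA
    simp only [pvPrefs]
    have : post.map (fun t => (t.1, t.2.1, pvFd t.1 ([] : List Int) day)) = post := by
      conv_rhs => rw [← List.map_id post]
      exact List.map_congr_left (fun t ht => by
        have h3 := hneg t ht
        simp [pvFd, ← h3])
    rw [this]
  | cons r rest ih =>
    unfold pvMainA
    simp only
    set total' := total + r with htot
    rw [whileA_spec total' day pre post hs]
    set P1 := post.takeWhile (fun t => total' ≥ t.1) with hP1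
    set P2 := post.dropWhile (fun t => total' ≥ t.1) with hP2
    have hsplit := map_split total' day post hs
    have hpost : post = P1 ++ P2 := (List.takeWhile_append_dropWhile).symm
    have hP1mem : ∀ t ∈ P1, total' ≥ t.1 := by
      intro t ht
      have := List.mem_takeWhile_imp ht
      simpa using this
    have hP2mem : ∀ t ∈ P2, ¬ total' ≥ t.1 := dropWhile_fails total' post hs
    have hfd1 : ∀ t ∈ P1, pvFd t.1 (pvPrefs total (r :: rest)) day = day := by
      intro t ht
      simp [pvPrefs, pvFd, ← htot, hP1mem t ht]
    have hfd2 : ∀ t ∈ P2,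
        pvFd t.1 (pvPrefs total (r :: rest)) day = pvFd t.1 (pvPrefs total' rest) (day + 1) := by
      intro t ht
      simp [pvPrefs, pvFd, ← htot, hP2mem t ht]
    have hrhs : post.map (fun t => (t.1, t.2.1, pvFd t.1 (pvPrefs total (r :: rest)) day))
        = P1.map (fun t => (t.1, t.2.1, day))
          ++ P2.map (fun t => (t.1, t.2.1, pvFd t.1 (pvPrefs total' rest) (day + 1))) := by
      conv_lhs => rw [hpost]
      rw [List.map_append]
      congr 1
      · exact List.map_congr_left (fun t ht => by rw [hfd1 t ht])
      · exact List.map_congr_left (fun t ht => by rw [hfd2 t ht])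
    by_cases hbr : pre.length + P1.length = mlen
    · -- break: all milestones assigned, P2 must be empty
      have hP2nil : P2 = [] := by
        have := congrArg List.length hpost
        simp at this
        have : P2.length = 0 := by omega
        exact List.eq_nil_of_length_eq_zero this
      simp only [hsplit, hbr, beq_self_eq_true, if_true]
      rw [hrhs, ← hP1, ← hP2, hP2nil]
      simp
    · have hne : (pre.length + P1.length == mlen) = false := by
        simp [hbr]
      simp only [hsplit, hne, Bool.false_eq_true, if_false]
      have hlen' : pre.length + P1.length = (pre ++ P1.map (fun t => (t.1, t.2.1, day))).length := by
        simp
      have hassoc : pre ++ (P1.map (fun t => (t.1, t.2.1, day)) ++ P2)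
          = (pre ++ P1.map (fun t => (t.1, t.2.1, day))) ++ P2 := by
        simp
      rw [hlen', hassoc,
        ih (day + 1) total' (pre ++ P1.map (fun t => (t.1, t.2.1, day))) P2
          (hs.sublist (List.dropWhile_sublist _))
          (fun t ht => hneg t ((List.dropWhile_sublist _).subset ht))
          (by
            have := congrArg List.length hpost
            simp at this ⊢
            omega)]
      rw [hrhs]
      simp

-- the fully-characterised final sorted list
lemma sortedA_eq (revs ms : List Int) :
    PySem.List.sorted
      (pvMainA ms.length revs 1 0 0
        (PySem.List.sorted (pvBuildA ms) (fun t => t.1) false)).2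
      (fun t => t.2.1) false
    = ms.zipIdx.map (fun p => (p.1, (p.2 : Int) + 1, pvFd p.1 (pvPrefs 0 revs) 1)) := by
  set sm0 := PySem.List.sorted (pvBuildA ms) (fun t => t.1) false with hsm0
  have hsort : sm0.Pairwise (fun a b => a.1 ≤ b.1) :=
    PySem.List.sorted_pairwise (pvBuildA ms) (fun t => t.1)
  have hneg : ∀ t ∈ sm0, t.2.2 = -1 := by
    intro t ht
    have : t ∈ pvBuildA ms := (PySem.List.mem_sorted _ _ _ _).mp ht
    rw [pvBuildA_eq] at this
    obtain ⟨p, _, rfl⟩ := List.mem_map.mp this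
    rfl
  have hlen : ms.length = sm0.length := by
    rw [hsm0, PySem.List.length_sorted, pvBuildA_eq]
    simp
  have hmain := mainA_spec ms.length revs 1 0 [] sm0 hsort hneg (by simpa using hlen)
  simp only [List.length_nil, List.nil_append] at hmain
  rw [hmain]
  -- name the sorted order: target is a key-strictly-increasing permutation
  apply PySem.List.sorted_eq_of_perm_of_pairwise_lt
  · -- Perm
    have hperm : sm0.Perm (pvBuildA ms) := PySem.List.sorted_perm _ _ _
    have hmapperm :
        (sm0.map (fun t => (t.1, t.2.1, pvFd t.1 (pvPrefs 0 revs) 1))).Perm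
          ((pvBuildA ms).map (fun t => (t.1, t.2.1, pvFd t.1 (pvPrefs 0 revs) 1))) :=
      hperm.map _
    have hbuild : (pvBuildA ms).map (fun t => (t.1, t.2.1, pvFd t.1 (pvPrefs 0 revs) 1))
        = ms.zipIdx.map (fun p => (p.1, (p.2 : Int) + 1, pvFd p.1 (pvPrefs 0 revs) 1)) := by
      rw [pvBuildA_eq, List.map_map]
      rfl
    rw [hbuild] at hmapperm
    exact hmapperm.symm
  · -- keys (i : Int) + 1 strictly increasing
    rw [List.pairwise_iff_getElem]
    intro i j hi hj hij
    simp only [List.getElem_map, List.getElem_zipIdx] at *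
    simp only [List.length_map, List.length_zipIdx] at hi hj
    have : (i : Int) < j := by exact_mod_cast hij
    omega

lemma foldl_append_snd (l : List (Int × Int × Int)) (acc : List Int) :
    l.foldl (fun days t => days ++ [t.2.2]) acc = acc ++ l.map (fun t => t.2.2) := by
  induction l generalizing acc with
  | nil => simp
  | cons t rest ih => simp [ih]

-- ===== VERDICT (by name: the statement is the Claim_ definition above) =====
theorem getMilestoneDays_spec : Claim_equal_getMilestoneDays := by
  intro revs ms _
  unfold Spec_getMilestoneDays
  unfold getMilestoneDays
  simp only
  rw [sortedA_eq, foldl_append_snd, alt_eq, List.nil_append]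
  apply List.ext_getElem <;> simp [List.getElem_zipIdx]
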